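-- pv_equiv track=rewrite | github.com/richardh05/Workout-Tracker | python/MarkdownLog.py | _seperateByHeader
-- ===== SOURCE A (Python) =====
-- from typing import List
--
-- def _seperateByHeader(mdFile: List[str], header: str) -> List[str]:
--     hBlocks: List[str] = []
--     current_block: str = ""
--
--     for line in mdFile:
--         line = line.strip()
--         if line.startswith(header):
--             if current_block:
--                 hBlocks.append(current_block.strip())
--             current_block = line + "\n"  # Start a new block with the heading
--         elif current_block:  # Only add content if we are within a header's block
--             current_block += line + "\n"
--
--     if current_block:
--         hBlocks.append(current_block.strip())
--     return hBlocks
-- ===== SOURCE B (Python) =====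
-- from typing import List
--
-- def _seperateByHeader(mdFile: List[str], header: str) -> List[str]:
--     # strip once, keep as a stack whose top is the first line
--     stack = [line.strip() for line in reversed(mdFile)]
--     # drop the prologue before the first header line
--     while stack and not stack[-1].startswith(header):
--         stack.pop()
--     blocks: List[str] = []
--     while stack:
--         seg = [stack.pop()]  # the header line opens the segment
--         while stack and not stack[-1].startswith(header):
--             seg.append(stack.pop())
--         blocks.append("\n".join(seg).strip())
--     return blocks
-- ===== Notes on version B (the rewrite author's own statement) =====
-- stated objective: alternative
-- what changed: A accumulates a growing current-block string and flushes it on each header / at EOF; B strips all lines once, drops the prologue before the first header, then repeatedly cuts off one header-led segment of lines and joins each segment into a block.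
import Mathlib
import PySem

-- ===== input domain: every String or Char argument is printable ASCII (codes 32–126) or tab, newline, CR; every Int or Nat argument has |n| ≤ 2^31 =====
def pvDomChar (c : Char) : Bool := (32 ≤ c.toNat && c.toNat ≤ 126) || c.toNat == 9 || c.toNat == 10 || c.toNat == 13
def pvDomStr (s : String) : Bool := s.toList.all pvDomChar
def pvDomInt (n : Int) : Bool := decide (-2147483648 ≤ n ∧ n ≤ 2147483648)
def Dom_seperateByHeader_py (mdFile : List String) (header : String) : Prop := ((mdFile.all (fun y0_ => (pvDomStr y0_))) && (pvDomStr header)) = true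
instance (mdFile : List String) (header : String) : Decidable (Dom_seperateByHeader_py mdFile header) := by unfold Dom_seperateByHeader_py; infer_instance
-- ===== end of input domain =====

-- B replaces A's accumulate-a-string-and-flush loop by: strip all lines once, drop the
-- prologue before the first header line, then cut off one header-led segment at a time
-- and join each segment ('alternative' objective, same cost).

-- ===== PORT A =====
-- A's for-loop body: state = (hBlocks, current_block); truthiness of a str is ≠ "".
def sbhStep (header : String) (st : List String × String) (line : String) : List String × String :=
  let l := PySem.Str.strip line
  if PySem.Str.startswith l header then
    ((if st.2 = "" then st.1 else st.1 ++ [PySem.Str.strip st.2]), l ++ "\n")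
  else if st.2 = "" then st
  else (st.1, st.2 ++ (l ++ "\n"))

def seperateByHeader_py (mdFile : List String) (header : String) : List String :=
  let st := mdFile.foldl (sbhStep header) ([], "")
  if st.2 = "" then st.1 else st.1 ++ [PySem.Str.strip st.2]

-- ===== PORT B =====
-- Source B keeps the lines on a stack whose TOP is the first remaining line; here the stack is a
-- List String with head = top, so 'stack[-1]' is the head and 'pop()' is taking the tail.

-- Source B: 'while stack and not stack[-1].startswith(header): stack.pop()'  (prologue)
def sbhDrop (header : String) : List String → List String
  | [] => []
  | l :: ls => if PySem.Str.startswith l header then l :: ls else sbhDrop header ls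

-- Source B inner loop: pop body lines until the next header; returns (seg tail, remaining stack)
def sbhBody (header : String) : List String → List String × List String
  | [] => ([], [])
  | l :: ls =>
    if PySem.Str.startswith l header then ([], l :: ls)
    else (l :: (sbhBody header ls).1, (sbhBody header ls).2)

-- (cited by sbhBlocks' decreasing_by)
theorem sbhBody_len (header : String) : ∀ ls : List String, (sbhBody header ls).2.length ≤ ls.length := by
  intro ls
  induction ls with
  | nil => simp [sbhBody]
  | cons l ls ih =>
    by_cases h : PySem.Chars.startswith l.toList header.toList = true
    · simp [sbhBody, PySem.Str.startswith, h]
    · simp [sbhBody, PySem.Str.startswith, h]; omega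

-- Source B outer loop: seg = [header line] ++ body; blocks.append("\n".join(seg).strip())
def sbhBlocks (header : String) : List String → List String
  | [] => []
  | l :: ls =>
    PySem.Str.strip (PySem.Str.join "\n" (l :: (sbhBody header ls).1)) ::
      sbhBlocks header (sbhBody header ls).2
termination_by ls => ls.length
decreasing_by
  simp only [List.length_cons]
  exact Nat.lt_succ_of_le (sbhBody_len header ls)

def seperateByHeader_py_alt (mdFile : List String) (header : String) : List String :=
  sbhBlocks header (sbhDrop header (mdFile.map PySem.Str.strip))

-- ===== PRECONDITION & SPEC =====
def Spec_seperateByHeader_py (mdFile : List String) (header : String) (out : List String) : Prop := out = seperateByHeader_py_alt mdFile header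
instance (mdFile : List String) (header : String) (out : List String) : Decidable (Spec_seperateByHeader_py mdFile header out) := by unfold Spec_seperateByHeader_py; infer_instance

-- ===== CLAIM (what is proved, stated in full; the proofs are below) =====
def Claim_equal_seperateByHeader_py : Prop := ∀ (mdFile : List String) (header : String), Dom_seperateByHeader_py mdFile header → Spec_seperateByHeader_py mdFile header (seperateByHeader_py mdFile header)

-- ===== LEMMAS AND PROOFS =====

-- current_block as a function of the list of (stripped) lines it holds
def blkStr (seg : List String) : String :=
  String.ofList ((seg.map (fun l => l.toList ++ ['\n'])).flatten)

theorem blkStr_nil : blkStr [] = "" := by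
  rw [← String.toList_inj]; simp [blkStr]

theorem blkStr_ne_empty (seg : List String) (h : seg ≠ []) : blkStr seg ≠ "" := by
  cases seg with
  | nil => exact absurd rfl h
  | cons a t =>
    intro hc
    rw [← String.toList_inj] at hc
    simp [blkStr] at hc

theorem blkStr_singleton (l : String) : blkStr [l] = l ++ "\n" := by
  rw [← String.toList_inj]; simp [blkStr]

theorem blkStr_append_one (seg : List String) (l : String) :
    blkStr (seg ++ [l]) = blkStr seg ++ (l ++ "\n") := by
  rw [← String.toList_inj]; simp [blkStr]

theorem chars_strip_newline (cs : List Char) :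
    PySem.Chars.strip (cs ++ ['\n']) = PySem.Chars.strip cs := by
  have hs : PySem.Chars.isspace '\n' = true := by decide
  simp only [PySem.Chars.strip, PySem.Chars.lstrip, PySem.Chars.rstrip, List.dropWhile_append]
  by_cases h : (List.dropWhile PySem.Chars.isspace cs).isEmpty
  · rw [if_pos h, List.isEmpty_iff.mp h]
    simp [hs]
  · rw [if_neg h]
    simp [List.reverse_append, hs]

theorem flatten_nl : ∀ (x : List Char) (xs : List (List Char)),
    ((x :: xs).map (fun c => c ++ ['\n'])).flatten = PySem.Chars.join ['\n'] (x :: xs) ++ ['\n'] := by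
  intro x xs
  induction xs generalizing x with
  | nil => simp [PySem.Chars.join, List.intercalate]
  | cons y ys ih =>
    simp only [List.map_cons, List.flatten_cons] at *
    rw [ih y]
    simp [PySem.Chars.join, List.intercalate, List.intersperse]

theorem strip_blkStr (seg : List String) (h : seg ≠ []) :
    PySem.Str.strip (blkStr seg) = PySem.Str.strip (PySem.Str.join "\n" seg) := by
  cases seg with
  | nil => exact absurd rfl h
  | cons a t =>
    rw [← String.toList_inj]
    simp only [PySem.Str.strip, PySem.Str.join, String.toList_ofList, blkStr]
    have hmap : (a :: t).map (fun l => l.toList ++ ['\n'])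
        = ((a :: t).map String.toList).map (fun c => c ++ ['\n']) := by
      simp [List.map_map]
    rw [hmap, List.map_cons, flatten_nl, chars_strip_newline]
    have hnl : ("\n" : String).toList = ['\n'] := by decide
    rw [hnl]

-- A's step on an already-stripped line
def sbhStepS (header : String) (st : List String × String) (l : String) : List String × String :=
  if PySem.Str.startswith l header then
    ((if st.2 = "" then st.1 else st.1 ++ [PySem.Str.strip st.2]), l ++ "\n")
  else if st.2 = "" then st
  else (st.1, st.2 ++ (l ++ "\n"))

def sbhFin (st : List String × String) : List String :=
  if st.2 = "" then st.1 else st.1 ++ [PySem.Str.strip st.2]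

-- A's loop, rephrased over the segment the current block holds
def sbhG (header : String) : List String → List String → List String
  | seg, [] => if seg = [] then [] else [PySem.Str.strip (blkStr seg)]
  | seg, l :: ls =>
    if PySem.Str.startswith l header then
      (if seg = [] then [] else [PySem.Str.strip (blkStr seg)]) ++ sbhG header [l] ls
    else if seg = [] then sbhG header [] ls
    else sbhG header (seg ++ [l]) ls

theorem sbhBlocks_nil (header : String) : sbhBlocks header [] = [] := by
  rw [sbhBlocks.eq_def]

theorem sbhBlocks_cons (header l : String) (ls : List String) :
    sbhBlocks header (l :: ls)
      = PySem.Str.strip (PySem.Str.join "\n" (l :: (sbhBody header ls).1)) ::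
          sbhBlocks header (sbhBody header ls).2 := by
  rw [sbhBlocks.eq_def]

theorem sbhRep (header : String) : ∀ (ls : List String) (acc seg : List String),
    sbhFin (ls.foldl (sbhStepS header) (acc, blkStr seg)) = acc ++ sbhG header seg ls := by
  intro ls
  induction ls with
  | nil =>
    intro acc seg
    by_cases h : seg = []
    · subst h; simp [sbhFin, sbhG, blkStr_nil]
    · simp [sbhFin, sbhG, h, blkStr_ne_empty seg h]
  | cons l ls ih =>
    intro acc seg
    have hb : PySem.Str.startswith l header
        = PySem.Chars.startswith l.toList header.toList := rfl
    simp only [List.foldl_cons]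
    by_cases hh : PySem.Str.startswith l header = true
    · have hh' : PySem.Chars.startswith l.toList header.toList = true := hb ▸ hh
      have hstep : sbhStepS header (acc, blkStr seg) l
          = ((if seg = [] then acc else acc ++ [PySem.Str.strip (blkStr seg)]), blkStr [l]) := by
        by_cases h : seg = []
        · subst h; simp [sbhStepS, hh', blkStr_nil, blkStr_singleton]
        · simp [sbhStepS, hh', blkStr_ne_empty seg h, blkStr_singleton, h]
      rw [hstep]
      by_cases h : seg = []
      · subst h; rw [if_pos rfl, ih acc [l]]
        simp [sbhG, hh']
      · rw [if_neg h, ih (acc ++ [PySem.Str.strip (blkStr seg)]) [l]]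
        simp [sbhG, hh', h, List.append_assoc]
    · have hh2 : PySem.Str.startswith l header = false := by simpa using hh
      have hh' : PySem.Chars.startswith l.toList header.toList = false := hb ▸ hh2
      by_cases h : seg = []
      · subst h
        have hstep : sbhStepS header (acc, blkStr []) l = (acc, blkStr []) := by
          simp [sbhStepS, hh', blkStr_nil]
        rw [hstep, ih acc []]
        simp [sbhG, hh']
      · have hstep : sbhStepS header (acc, blkStr seg) l = (acc, blkStr (seg ++ [l])) := by
          simp [sbhStepS, hh', blkStr_ne_empty seg h, blkStr_append_one]
        rw [hstep, ih acc (seg ++ [l])]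
        simp [sbhG, hh', h]

theorem sbhG_ne (header : String) : ∀ (ls seg : List String), seg ≠ [] →
    sbhG header seg ls
      = PySem.Str.strip (PySem.Str.join "\n" (seg ++ (sbhBody header ls).1)) ::
          sbhBlocks header (sbhBody header ls).2 := by
  intro ls
  induction ls with
  | nil =>
    intro seg h
    simp [sbhG, sbhBody, sbhBlocks_nil, h, strip_blkStr seg h]
  | cons l ls ih =>
    intro seg h
    have hb : PySem.Str.startswith l header
        = PySem.Chars.startswith l.toList header.toList := rfl
    by_cases hh : PySem.Str.startswith l header = true
    · have hh' : PySem.Chars.startswith l.toList header.toList = true := hb ▸ hh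
      have hl : ([l] : List String) ≠ [] := by simp
      have hbody : sbhBody header (l :: ls) = ([], l :: ls) := by simp [sbhBody, hh']
      simp only [sbhG, hh, if_true, if_neg h, ih [l] hl, hbody, sbhBlocks_cons]
      simp [strip_blkStr seg h]
    · have hh2 : PySem.Str.startswith l header = false := by simpa using hh
      have hh' : PySem.Chars.startswith l.toList header.toList = false := hb ▸ hh2
      have h' : seg ++ [l] ≠ [] := by simp
      simp only [sbhG, hh2, Bool.false_eq_true, if_false, if_neg h, ih (seg ++ [l]) h']
      simp [sbhBody, hh', List.append_assoc]

theorem sbhG_nil (header : String) : ∀ ls : List String,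
    sbhG header [] ls = sbhBlocks header (sbhDrop header ls) := by
  intro ls
  induction ls with
  | nil => simp [sbhG, sbhDrop, sbhBlocks_nil]
  | cons l ls ih =>
    have hb : PySem.Str.startswith l header
        = PySem.Chars.startswith l.toList header.toList := rfl
    by_cases hh : PySem.Str.startswith l header = true
    · have hh' : PySem.Chars.startswith l.toList header.toList = true := hb ▸ hh
      have hl : ([l] : List String) ≠ [] := by simp
      simp only [sbhG, hh, if_true, List.nil_append, sbhG_ne header ls [l] hl,
        sbhDrop, sbhBlocks_cons]
      simp
    · have hh2 : PySem.Str.startswith l header = false := by simpa using hh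
      have hh' : PySem.Chars.startswith l.toList header.toList = false := hb ▸ hh2
      simp only [sbhG, hh2, Bool.false_eq_true, if_false, sbhDrop, ih]
      simp

-- ===== VERDICT (by name: the statement is the Claim_ definition above) =====
theorem seperateByHeader_py_spec : Claim_equal_seperateByHeader_py := by
  intro mdFile header _
  show sbhFin (mdFile.foldl (sbhStep header) ([], "")) = seperateByHeader_py_alt mdFile header
  have hfun : sbhStep header = fun st line => sbhStepS header st (PySem.Str.strip line) :=
    funext fun st => funext fun line => rfl
  have hfold : mdFile.foldl (sbhStep header) ([], "")
      = (mdFile.map PySem.Str.strip).foldl (sbhStepS header) ([], "") := by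
    rw [List.foldl_map, hfun]
  rw [hfold]
  have h2 := sbhRep header (mdFile.map PySem.Str.strip) [] []
  rw [blkStr_nil] at h2
  rw [h2, List.nil_append, sbhG_nil]
  rfl
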